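-- pv_equiv track=rewrite | github.com/shauryasharma46/ACC45DAYSOFCODE-2024 | day1.py | is_easy_to_pronounce
-- ===== SOURCE A (Python) =====
-- def is_easy_to_pronounce(word):
--     vowels = {'a', 'e', 'i', 'o', 'u'}
--     consecutive_consonants = 0
--
--     for char in word:
--         if char not in vowels:
--             consecutive_consonants += 1
--             if consecutive_consonants >= 4:
--                 return "NO"
--         else:
--             consecutive_consonants = 0
--     return "YES"
-- ===== SOURCE B (Python) =====
-- def is_easy_to_pronounce(word):
--     vowels = set('aeiou')
--     if any(all(c not in vowels for c in word[i:i+4]) for i in range(len(word) - 3)):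
--         return "NO"
--     return "YES"
-- ===== Notes on version B (the rewrite author's own statement) =====
-- stated objective: idiomatic
-- what changed: Replaced the stateful running consonant counter with an any/all check over every 4-character window of the word.
import Mathlib
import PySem

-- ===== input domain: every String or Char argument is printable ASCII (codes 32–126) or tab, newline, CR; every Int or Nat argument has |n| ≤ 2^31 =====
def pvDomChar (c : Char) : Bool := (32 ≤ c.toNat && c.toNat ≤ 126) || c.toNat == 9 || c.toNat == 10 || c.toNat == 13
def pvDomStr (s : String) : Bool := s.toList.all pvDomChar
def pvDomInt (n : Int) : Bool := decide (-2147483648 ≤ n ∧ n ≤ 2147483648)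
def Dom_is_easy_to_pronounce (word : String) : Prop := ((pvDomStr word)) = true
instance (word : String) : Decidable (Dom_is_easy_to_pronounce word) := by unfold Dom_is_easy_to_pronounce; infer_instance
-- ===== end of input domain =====

-- B replaces A's running consonant counter by an idiomatic check over all 4-char windows (any/all); objective: idiomatic, same exact results.

-- ===== PORT A =====
def pvVowelsA : PySem.Set Char := PySem.Set.ofList ['a', 'e', 'i', 'o', 'u']

-- the for-loop of A, with its early return "NO": state = consecutive_consonants
def pvLoopA : List Char → Nat → String
  | [], _ => "YES"
  | c :: cs, k =>
      if !(PySem.Set.contains pvVowelsA c) then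
        (if k + 1 ≥ 4 then "NO" else pvLoopA cs (k + 1))
      else
        pvLoopA cs 0

def is_easy_to_pronounce (word : String) : String := pvLoopA word.toList 0

-- ===== PORT B =====
def pvVowelsB : PySem.Set Char := PySem.Set.ofList ['a', 'e', 'i', 'o', 'u']

def is_easy_to_pronounce_alt (word : String) : String :=
  let l := word.toList
  if (PySem.List.pyRange 0 ((l.length : Int) - 3) 1).any
       (fun i => (PySem.List.slice l (some i) (some (i + 4))).all
         (fun c => !(PySem.Set.contains pvVowelsB c))) then
    "NO"
  else
    "YES"

-- ===== PRECONDITION & SPEC =====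
def Spec_is_easy_to_pronounce (word : String) (out : String) : Prop := out = is_easy_to_pronounce_alt word
instance (word : String) (out : String) : Decidable (Spec_is_easy_to_pronounce word out) := by unfold Spec_is_easy_to_pronounce; infer_instance

-- ===== CLAIM (what is proved, stated in full; the proofs are below) =====
def Claim_equal_is_easy_to_pronounce : Prop := ∀ (word : String), Dom_is_easy_to_pronounce word → Spec_is_easy_to_pronounce word (is_easy_to_pronounce word)

-- ===== LEMMAS AND PROOFS =====

-- a consonant for both programs: not one of the five lowercase vowels
def pvCons (c : Char) : Bool := !(PySem.Set.contains pvVowelsA c)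

-- "some 4-char window of l is all consonants"
def PvHasWin (l : List Char) : Prop :=
  ∃ i : Nat, i + 4 ≤ l.length ∧ ((l.drop i).take 4).all pvCons = true

lemma pvHasWin_nil : ¬ PvHasWin [] := by
  rintro ⟨i, hi, _⟩; simp at hi

lemma pvHasWin_cons (c : Char) (cs : List Char) :
    PvHasWin (c :: cs) ↔
      (4 ≤ cs.length + 1 ∧ (((c :: cs).take 4).all pvCons = true)) ∨ PvHasWin cs := by
  constructor
  · rintro ⟨i, hi, hall⟩
    cases i with
    | zero => left; constructor; · simpa using hi
              · simpa using hall
    | succ j => right; exact ⟨j, by simpa using hi, by simpa using hall⟩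
  · rintro (⟨hlen, hall⟩ | ⟨j, hj, hall⟩)
    · exact ⟨0, by simpa using hlen, by simpa using hall⟩
    · exact ⟨j + 1, by simpa using hj, by simpa using hall⟩

-- monotone: an all-consonant prefix of length n gives one of length m ≤ n
lemma pv_take_mono (l : List Char) (m n : Nat) (hmn : m ≤ n)
    (h : n ≤ l.length ∧ (l.take n).all pvCons = true) :
    m ≤ l.length ∧ (l.take m).all pvCons = true := by
  refine ⟨le_trans hmn h.1, ?_⟩
  have : l.take m = (l.take n).take m := by
    rw [List.take_take, Nat.min_eq_left hmn]
  rw [this]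
  rw [List.all_eq_true] at *
  intro x hx
  exact h.2 x (List.take_subset _ _ hx)

-- characterisation of A's loop
lemma pvLoopA_char (l : List Char) : ∀ k : Nat, k ≤ 3 →
    (pvLoopA l k = "NO" ↔
      ((4 - k ≤ l.length ∧ (l.take (4 - k)).all pvCons = true) ∨ PvHasWin l)) := by
  induction l with
  | nil =>
      intro k hk
      simp only [pvLoopA]
      constructor
      · intro h; exact absurd h (by decide)
      · rintro (⟨h, _⟩ | h)
        · simp at h; omega
        · exact absurd h pvHasWin_nil
  | cons c cs ih =>
      intro k hk
      by_cases hc : pvCons c = true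
      · have hc' : (!(PySem.Set.contains pvVowelsA c)) = true := hc
        by_cases hk3 : k = 3
        · subst hk3
          have hmem : ¬ (c ∈ pvVowelsA) := by simpa [pvCons] using hc
          have hstep3 : pvLoopA (c :: cs) 3 = "NO" := by
            simp [pvLoopA, hmem]
          rw [hstep3]
          constructor
          · intro _
            left
            refine ⟨by simp, ?_⟩
            have h1 : (4 - 3 : Nat) = 1 := by norm_num
            rw [h1]
            simpa using hc
          · intro _; rfl
        · have hklt : k < 3 := lt_of_le_of_ne hk hk3
          have hstep : pvLoopA (c :: cs) k = pvLoopA cs (k + 1) := by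
            simp only [pvLoopA, hc']
            simp only [if_true]
            rw [if_neg (by omega)]
          have h34 : (4 - (k + 1) : Nat) = 3 - k := by omega
          rw [hstep, ih (k + 1) (by omega), h34, pvHasWin_cons]
          have htake : (4 - k : Nat) = (3 - k) + 1 := by omega
          constructor
          · rintro (⟨hlen, hall⟩ | hwin)
            · left
              refine ⟨by simp; omega, ?_⟩
              rw [htake, List.take_succ_cons, List.all_cons, hc, Bool.true_and]
              exact hall
            · right; right; exact hwin
          · rintro (⟨hlen, hall⟩ | ⟨hlen4, hall4⟩ | hwin)
            · left
              rw [htake, List.take_succ_cons, List.all_cons, hc, Bool.true_and] at hall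
              refine ⟨by simp at hlen ⊢; omega, hall⟩
            · have h4 : (4 : Nat) = 3 + 1 := by norm_num
              rw [h4, List.take_succ_cons, List.all_cons, hc, Bool.true_and] at hall4
              left
              exact pv_take_mono cs (3 - k) 3 (by omega) ⟨by simp at hlen4 ⊢; omega, hall4⟩
            · right; exact hwin
      · have hc' : (!(PySem.Set.contains pvVowelsA c)) = false := by
          simpa [pvCons] using hc
        have hmem : c ∈ pvVowelsA := by simpa [pvCons] using hc
        have hstep : pvLoopA (c :: cs) k = pvLoopA cs 0 := by
          simp [pvLoopA, hmem]
        rw [hstep, ih 0 (by omega), pvHasWin_cons]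
        have hpre : ∀ m : Nat, 1 ≤ m → ¬ (((c :: cs).take m).all pvCons = true) := by
          intro m hm hall
          rcases Nat.exists_eq_add_of_le hm with ⟨p, rfl⟩
          rw [Nat.add_comm, List.take_succ_cons, List.all_cons] at hall
          rw [Bool.and_eq_true] at hall
          exact absurd hall.1 (by simpa [pvCons] using hc)
        constructor
        · rintro (⟨hlen, hall⟩ | hwin)
          · right; right
            exact ⟨0, by simpa using hlen, by simpa using hall⟩
          · right; right; exact hwin
        · rintro (⟨_, hall⟩ | ⟨_, hall4⟩ | hwin)
          · exact absurd hall (hpre _ (by omega))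
          · exact absurd hall4 (hpre 4 (by omega))
          · right; exact hwin

-- B's test equals PvHasWin
lemma pvAlt_char (l : List Char) :
    ((PySem.List.pyRange 0 ((l.length : Int) - 3) 1).any
       (fun i => (PySem.List.slice l (some i) (some (i + 4))).all
         (fun c => !(PySem.Set.contains pvVowelsB c))) = true) ↔ PvHasWin l := by
  rw [PySem.List.pyRange_one]
  rw [List.any_map, List.any_eq_true]
  constructor
  · rintro ⟨j, hj, hall⟩
    rw [List.mem_range] at hj
    simp only [Function.comp] at hall
    have h0 : ((0 : Int) + (j : Int)) = (j : Int) := by ring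
    rw [h0] at hall
    have hcast : ((j : Int) + 4) = ((j + 4 : Nat) : Int) := by push_cast; ring
    rw [hcast, PySem.List.slice_natCast] at hall
    have hlen : j + 4 ≤ l.length := by
      have : ((l.length : Int) - 3 - 0).toNat ≤ l.length - 3 := by omega
      omega
    refine ⟨j, hlen, ?_⟩
    have : j + 4 - j = 4 := by omega
    rw [this] at hall
    exact hall
  · rintro ⟨i, hi, hall⟩
    refine ⟨i, ?_, ?_⟩
    · rw [List.mem_range]; omega
    · simp only [Function.comp]
      have h0 : ((0 : Int) + (i : Int)) = (i : Int) := by ring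
      rw [h0]
      have hcast : ((i : Int) + 4) = ((i + 4 : Nat) : Int) := by push_cast; ring
      rw [hcast, PySem.List.slice_natCast]
      have : i + 4 - i = 4 := by omega
      rw [this]
      exact hall

lemma pvLoopA_yes_or_no (l : List Char) : ∀ k, pvLoopA l k = "YES" ∨ pvLoopA l k = "NO" := by
  induction l with
  | nil => intro k; left; rfl
  | cons c cs ih =>
      intro k
      simp only [pvLoopA]
      split_ifs
      · right; rfl
      · exact ih (k + 1)
      · exact ih 0

-- ===== VERDICT (by name: the statement is the Claim_ definition above) =====
theorem is_easy_to_pronounce_spec : Claim_equal_is_easy_to_pronounce := by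
  intro word _
  unfold Spec_is_easy_to_pronounce is_easy_to_pronounce is_easy_to_pronounce_alt
  set l := word.toList with hl
  have hA := pvLoopA_char l 0 (by omega)
  have hB := pvAlt_char l
  by_cases hwin : PvHasWin l
  · have hAno : pvLoopA l 0 = "NO" := hA.mpr (Or.inr hwin)
    rw [hAno]
    simp only []
    rw [if_pos (hB.mpr hwin)]
  · have hAnotno : pvLoopA l 0 ≠ "NO" := by
      intro h
      rcases hA.mp h with ⟨hlen, hall⟩ | hw
      · exact hwin ⟨0, by simpa using hlen, by simpa using hall⟩
      · exact hwin hw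
    have hAyes : pvLoopA l 0 = "YES" := by
      rcases pvLoopA_yes_or_no l 0 with h | h
      · exact h
      · exact absurd h hAnotno
    rw [hAyes]
    simp only []
    rw [if_neg (fun h => hwin (hB.mp h))]
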